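-- pv_equiv track=rewrite | github.com/alexpsachs/Masters-Thesis | Library/SYMLOG.py | calc
-- ===== SOURCE A (Python) =====
-- def calc(s,d):
--     first = s[0]
--     second = s[2]
--     def sumKey(c,d):
--         return sum([val for key,val in d.items() if c in key.lower()]) # ranges from 0 to 9
--     initial = sumKey(first,d) - sumKey(second,d) # ranges from -9 to 9 so double to get the compatible range of -18 to 18
--     ans = initial * 2
--     return ans
-- ===== SOURCE B (Python) =====
-- def calc(s, d):
--     first = s[0]
--     second = s[2]
--     total = 0
--     for key, val in d.items():
--         kl = key.lower()
--         if first in kl: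
--             total += val
--         if second in kl:
--             total -= val
--     return total * 2
-- ===== Notes on version B (the rewrite author's own statement) =====
-- stated objective: simpler
-- what changed: Replaces the two separate sum-comprehension passes over d.items() (one per character) with a single loop that lowers each key once and maintains one signed accumulator.
import Mathlib
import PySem

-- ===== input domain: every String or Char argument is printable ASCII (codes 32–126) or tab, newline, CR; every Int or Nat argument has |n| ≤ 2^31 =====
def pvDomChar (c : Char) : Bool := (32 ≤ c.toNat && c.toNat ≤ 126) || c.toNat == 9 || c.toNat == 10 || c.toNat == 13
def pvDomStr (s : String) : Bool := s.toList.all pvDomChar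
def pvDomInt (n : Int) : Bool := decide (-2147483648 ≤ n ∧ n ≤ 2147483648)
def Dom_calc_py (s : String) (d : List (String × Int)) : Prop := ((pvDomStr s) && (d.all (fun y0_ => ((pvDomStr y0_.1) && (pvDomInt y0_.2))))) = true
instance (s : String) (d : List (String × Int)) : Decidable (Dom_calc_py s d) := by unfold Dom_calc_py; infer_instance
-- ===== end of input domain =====

-- B replaces A's two sum-comprehension passes over d.items() with one loop keeping a single
-- signed accumulator (objective: simpler; one pass, one lower() per key).

-- ===== PORT A =====
-- sumKey(c, d): sum([val for key,val in d.items() if c in key.lower()])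
def calcSumKey (c : Char) (dd : PySem.Dict String Int) : Int :=
  ((dd.items.filter (fun kv => PySem.Chars.isIn [c] (PySem.Chars.lower kv.1.toList))).map
    (fun kv => kv.2)).sum

def calc_py (s : String) (d : List (String × Int)) : Int :=
  let dd := PySem.Dict.ofList d
  match PySem.Str.pyGet? s 0, PySem.Str.pyGet? s 2 with
  | some first, some second =>
      let initial := calcSumKey first dd - calcSumKey second dd
      initial * 2
  | _, _ => 0   -- dead under Pre_: Python raises IndexError when len(s) < 3

-- ===== PORT B =====
def calc_py_alt (s : String) (d : List (String × Int)) : Int :=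
  let dd := PySem.Dict.ofList d
  match PySem.Str.pyGet? s 0 with
  | none => 0   -- dead under Pre_: Python raises IndexError when len(s) < 3
  | some first =>
    match PySem.Str.pyGet? s 2 with
    | none => 0   -- dead under Pre_
    | some second =>
      (dd.items.foldl (fun total kv =>
          let kl := PySem.Chars.lower kv.1.toList
          let t1 := if PySem.Chars.isIn [first] kl then total + kv.2 else total
          if PySem.Chars.isIn [second] kl then t1 - kv.2 else t1) 0) * 2

-- ===== PRECONDITION & SPEC =====
-- Pre_ excludes exactly the inputs where Python A raises IndexError: s[2] (hence s[0]) needs len(s) ≥ 3.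
def Pre_calc_py (s : String) (d : List (String × Int)) : Prop := 3 ≤ s.toList.length
instance (s : String) (d : List (String × Int)) : Decidable (Pre_calc_py s d) := by unfold Pre_calc_py; infer_instance
def pvWitness_calc_py : String × (List (String × Int)) := ("abc", [("Ab", 3), ("c", 2)])
def Spec_calc_py (s : String) (d : List (String × Int)) (out : Int) : Prop := out = calc_py_alt s d
instance (s : String) (d : List (String × Int)) (out : Int) : Decidable (Spec_calc_py s d out) := by unfold Spec_calc_py; infer_instance

-- ===== CLAIM (what is proved, stated in full; the proofs are below) =====
def Claim_equal_calc_py : Prop := ∀ (s : String) (d : List (String × Int)), Dom_calc_py s d → Pre_calc_py s d → Spec_calc_py s d (calc_py s d)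

-- ===== LEMMAS AND PROOFS =====
-- B's single fold over the items equals the difference of A's two filtered sums.
theorem calc_fold_eq (first second : Char) (l : List (String × Int)) (acc : Int) :
    l.foldl (fun total kv =>
        let kl := PySem.Chars.lower kv.1.toList
        let t1 := if PySem.Chars.isIn [first] kl then total + kv.2 else total
        if PySem.Chars.isIn [second] kl then t1 - kv.2 else t1) acc
      = acc
        + ((l.filter (fun kv => PySem.Chars.isIn [first] (PySem.Chars.lower kv.1.toList))).map (fun kv => kv.2)).sum
        - ((l.filter (fun kv => PySem.Chars.isIn [second] (PySem.Chars.lower kv.1.toList))).map (fun kv => kv.2)).sum := by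
  induction l generalizing acc with
  | nil => simp
  | cons kv t ih =>
    simp only [List.foldl_cons, List.filter_cons, ih]
    by_cases h1 : PySem.Chars.isIn [first] (PySem.Chars.lower kv.1.toList) = true <;>
      by_cases h2 : PySem.Chars.isIn [second] (PySem.Chars.lower kv.1.toList) = true <;>
      simp [h1, h2] <;> ring

-- ===== VERDICT (by name: the statement is the Claim_ definition above) =====
theorem calc_py_spec : Claim_equal_calc_py := by
  intro s d _ _
  unfold Spec_calc_py calc_py calc_py_alt calcSumKey
  cases PySem.Str.pyGet? s 0 <;> cases PySem.Str.pyGet? s 2 <;>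
    simp [calc_fold_eq]
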